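-- pv_equiv track=rewrite | github.com/infosec-shinobi/advent_of_code | 2024/done/08/p2.py | find_all_antinodes
-- ===== SOURCE A (Python) =====
-- def find_all_antinodes(max_cords, coord1, coord2):
--     all_antinodes = []
--     x1 = int(coord1[0])
--     y1 = int(coord1[1])
--     x2 = int(coord2[0])
--     y2 = int(coord2[1])
--
--     xslope = x2 - x1
--     yslope = y2 - y1
--
--     left_done = False
--     right_done = False
--
--     lsx = x1
--     lsy = y1
--     rsx = x2
--     rsy = y2
--     while not left_done:
--         tx = lsx - xslope
--         ty = lsy - yslope
--         if (tx < 0 or tx > max_cords[0]) or (ty < 0 or ty > max_cords[1]):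
--             left_done = True
--         else:
--             all_antinodes.append((tx,ty))
--             lsx = tx
--             lsy = ty
--     while not right_done:
--         tx = rsx + xslope
--         ty = rsy + yslope
--         if (tx < 0 or tx > max_cords[0]) or (ty < 0 or ty > max_cords[1]):
--             right_done = True
--         else:
--             all_antinodes.append((tx,ty))
--             rsx = tx
--             rsy = ty
--     return all_antinodes
-- ===== SOURCE B (Python) =====
-- def _span(p, m, s):
--     # valid step indices j (positions p + j*s inside [0, m]) form the interval [lo, hi];
--     # returns (whether j = 1 is valid and reachable, hi); hi = None means unbounded (s == 0)
--     if s == 0: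
--         return (0 <= p <= m, None)
--     if s > 0:
--         lo = -(p // s)
--         hi = (m - p) // s
--     else:
--         t = -s
--         lo = -((m - p) // t)
--         hi = p // t
--     return (lo <= 1 <= hi, hi)
--
--
-- def _count(px, py, mx, my, sx, sy):
--     # largest k >= 0 such that positions after steps 1..k all stay inside the grid
--     okx, hx = _span(px, mx, sx)
--     oky, hy = _span(py, my, sy)
--     if not (okx and oky):
--         return 0
--     if hx is None and hy is None:
--         return 0  # zero step vector: no distinct points to emit
--     if hx is None:
--         return hy
--     if hy is None:
--         return hx
--     return min(hx, hy)
--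
--
-- def find_all_antinodes(max_cords, coord1, coord2):
--     mx, my = max_cords[0], max_cords[1]
--     x1, y1 = int(coord1[0]), int(coord1[1])
--     x2, y2 = int(coord2[0]), int(coord2[1])
--     sx, sy = x2 - x1, y2 - y1
--     kl = _count(x1, y1, mx, my, -sx, -sy)
--     kr = _count(x2, y2, mx, my, sx, sy)
--     return [(x1 - j * sx, y1 - j * sy) for j in range(1, kl + 1)] + \
--            [(x2 + j * sx, y2 + j * sy) for j in range(1, kr + 1)]
-- ===== Notes on version B (the rewrite author's own statement) =====
-- stated objective: alternative
-- what changed: Replaces the two step-by-step while loops with a closed-form computation of the number of in-bounds steps per direction (per-axis floor-division limits), then emits each direction's points directly from a range.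
-- outside the precondition, e.g. on find_all_antinodes((5, 5), (1, 1), (1, 1)): A does not finish within the time limit, B returns []
import Mathlib
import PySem

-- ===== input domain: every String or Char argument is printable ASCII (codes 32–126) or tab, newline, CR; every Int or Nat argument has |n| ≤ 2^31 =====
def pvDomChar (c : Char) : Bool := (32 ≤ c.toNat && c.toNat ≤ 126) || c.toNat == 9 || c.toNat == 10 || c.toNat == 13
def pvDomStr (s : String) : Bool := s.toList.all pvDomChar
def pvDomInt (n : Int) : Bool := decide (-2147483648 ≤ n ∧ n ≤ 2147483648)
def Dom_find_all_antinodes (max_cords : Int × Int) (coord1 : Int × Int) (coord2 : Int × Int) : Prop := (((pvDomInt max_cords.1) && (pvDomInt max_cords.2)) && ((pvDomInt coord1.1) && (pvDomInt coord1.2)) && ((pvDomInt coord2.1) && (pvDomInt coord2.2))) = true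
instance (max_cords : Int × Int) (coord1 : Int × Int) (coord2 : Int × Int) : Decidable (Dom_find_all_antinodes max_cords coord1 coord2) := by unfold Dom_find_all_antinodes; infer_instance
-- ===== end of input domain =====

-- B replaces A's two step-by-step while loops by a closed-form per-axis count of in-bounds
-- steps (floor-division limits) and emits each direction's points directly from a range.


-- ===== PORT A =====
-- A's two while loops, made total with fuel; inside Pre_ a loop runs at most
-- mx.toNat + my.toNat + 1 iterations (proved below), so the fuel never runs out.
def pvLoopA (mx my sx sy : Int) (px py : Int) : Nat → List (Int × Int)
  | 0 => []
  | n + 1 =>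
    let tx := px + sx
    let ty := py + sy
    if tx < 0 ∨ tx > mx ∨ ty < 0 ∨ ty > my then []
    else (tx, ty) :: pvLoopA mx my sx sy tx ty n

def find_all_antinodes (max_cords : Int × Int) (coord1 : Int × Int) (coord2 : Int × Int) : List (Int × Int) :=
  let x1 := coord1.1
  let y1 := coord1.2
  let x2 := coord2.1
  let y2 := coord2.2
  let xslope := x2 - x1
  let yslope := y2 - y1
  let fuel := max_cords.1.toNat + max_cords.2.toNat + 2
  pvLoopA max_cords.1 max_cords.2 (-xslope) (-yslope) x1 y1 fuel ++
    pvLoopA max_cords.1 max_cords.2 xslope yslope x2 y2 fuel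

-- ===== PORT B =====
-- _span from Source B: (is step 1 valid and reachable?, largest valid step index; none = unbounded)
def pvSpan (p m s : Int) : Bool × Option Int :=
  if s = 0 then (decide (0 ≤ p ∧ p ≤ m), none)
  else if 0 < s then
    let lo := -(PySem.Int.floordiv p s)
    let hi := PySem.Int.floordiv (m - p) s
    (decide (lo ≤ 1 ∧ 1 ≤ hi), some hi)
  else
    let t := -s
    let lo := -(PySem.Int.floordiv (m - p) t)
    let hi := PySem.Int.floordiv p t
    (decide (lo ≤ 1 ∧ 1 ≤ hi), some hi)

-- _count from Source B
def pvCount (px py mx my sx sy : Int) : Int :=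
  let xr := pvSpan px mx sx
  let yr := pvSpan py my sy
  if !(xr.1 && yr.1) then 0
  else
    match xr.2, yr.2 with
    | none, none => 0
    | none, some h => h
    | some h, none => h
    | some a, some b => min a b

def find_all_antinodes_alt (max_cords : Int × Int) (coord1 : Int × Int) (coord2 : Int × Int) : List (Int × Int) :=
  let mx := max_cords.1
  let my := max_cords.2
  let x1 := coord1.1
  let y1 := coord1.2
  let x2 := coord2.1
  let y2 := coord2.2
  let sx := x2 - x1
  let sy := y2 - y1
  let kl := pvCount x1 y1 mx my (-sx) (-sy)
  let kr := pvCount x2 y2 mx my sx sy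
  (PySem.List.pyRange 1 (kl + 1) 1).map (fun j => (x1 - j * sx, y1 - j * sy)) ++
    (PySem.List.pyRange 1 (kr + 1) 1).map (fun j => (x2 + j * sx, y2 + j * sy))

-- ===== PRECONDITION & SPEC =====
-- Pre_ excludes only coord1 = coord2 with that point inside the grid: there A's first
-- while loop never terminates (the step vector is (0,0)), so A returns no value.
def Pre_find_all_antinodes (max_cords : Int × Int) (coord1 : Int × Int) (coord2 : Int × Int) : Prop :=
  ¬ (coord1 = coord2 ∧ 0 ≤ coord1.1 ∧ coord1.1 ≤ max_cords.1 ∧ 0 ≤ coord1.2 ∧ coord1.2 ≤ max_cords.2)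

instance (max_cords : Int × Int) (coord1 : Int × Int) (coord2 : Int × Int) : Decidable (Pre_find_all_antinodes max_cords coord1 coord2) := by unfold Pre_find_all_antinodes; infer_instance

def pvWitness_find_all_antinodes : (Int × Int) × (Int × Int) × (Int × Int) := ((5, 5), (1, 1), (2, 3))

def Spec_find_all_antinodes (max_cords : Int × Int) (coord1 : Int × Int) (coord2 : Int × Int) (out : List (Int × Int)) : Prop := out = find_all_antinodes_alt max_cords coord1 coord2
instance (max_cords : Int × Int) (coord1 : Int × Int) (coord2 : Int × Int) (out : List (Int × Int)) : Decidable (Spec_find_all_antinodes max_cords coord1 coord2 out) := by unfold Spec_find_all_antinodes; infer_instance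

-- ===== CLAIM (what is proved, stated in full; the proofs are below) =====
def Claim_equal_find_all_antinodes : Prop := ∀ (max_cords : Int × Int) (coord1 : Int × Int) (coord2 : Int × Int), Dom_find_all_antinodes max_cords coord1 coord2 → Pre_find_all_antinodes max_cords coord1 coord2 → Spec_find_all_antinodes max_cords coord1 coord2 (find_all_antinodes max_cords coord1 coord2)

-- ===== LEMMAS AND PROOFS =====

-- characterization of pvSpan for a nonzero step: the valid step indices form [lo, hi],
-- the ok flag says 1 ∈ [lo, hi], and when ok holds, hi ≤ m + 1 and 0 ≤ m.
theorem pvSpan_zero (p m : Int) : pvSpan p m 0 = (decide (0 ≤ p ∧ p ≤ m), none) := by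
  simp [pvSpan]

theorem pvSpan_char (p m s : Int) (hs : s ≠ 0) :
    ∃ lo hi, pvSpan p m s = (decide (lo ≤ 1 ∧ 1 ≤ hi), some hi) ∧
      (∀ j : Int, (lo ≤ j ∧ j ≤ hi) ↔ (0 ≤ p + j * s ∧ p + j * s ≤ m)) ∧
      ((lo ≤ 1 ∧ 1 ≤ hi) → hi ≤ max m 0 + 1) := by
  rcases lt_or_gt_of_ne hs with hneg | hpos
  · -- s < 0
    refine ⟨-(PySem.Int.floordiv (m - p) (-s)), PySem.Int.floordiv p (-s), ?_, ?_, ?_⟩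
    · simp [pvSpan, hs, not_lt.mpr (le_of_lt hneg)]
    · intro j
      have h1 : (-(PySem.Int.floordiv (m - p) (-s)) ≤ j) ↔ ((-j) * (-s) ≤ m - p) := by
        rw [show (-(PySem.Int.floordiv (m - p) (-s)) ≤ j) ↔ (-j ≤ PySem.Int.floordiv (m - p) (-s)) from by omega,
          PySem.Int.le_floordiv_iff_mul_le (by omega)]
      have h2 : (j ≤ PySem.Int.floordiv p (-s)) ↔ (j * (-s) ≤ p) :=
        PySem.Int.le_floordiv_iff_mul_le (by omega)
      rw [h1, h2]
      constructor <;> intro h <;> constructor <;> nlinarith [h.1, h.2]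
    · rintro ⟨hlo, hhi⟩
      set lo := -(PySem.Int.floordiv (m - p) (-s)) with hlodef
      set hi := PySem.Int.floordiv p (-s) with hhidef
      have hLO : (-lo) * (-s) ≤ m - p := by
        rw [show ((-lo) * (-s) ≤ m - p) ↔ (-lo ≤ PySem.Int.floordiv (m - p) (-s)) from
          (PySem.Int.le_floordiv_iff_mul_le (by omega)).symm]
        omega
      have hHI : hi * (-s) ≤ p := by
        rw [show (hi * (-s) ≤ p) ↔ (hi ≤ PySem.Int.floordiv p (-s)) from
          (PySem.Int.le_floordiv_iff_mul_le (by omega)).symm]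
      -- positions at lo and hi are both within [0, m]
      have hd : hi - lo ≤ m := by
        nlinarith [hLO, hHI, mul_nonneg (show (0:ℤ) ≤ hi - lo by omega) (show (0:ℤ) ≤ -s - 1 by omega)]
      have hm : (0:ℤ) ≤ m := by omega
      rw [max_eq_left hm]
      omega
  · -- s > 0
    refine ⟨-(PySem.Int.floordiv p s), PySem.Int.floordiv (m - p) s, ?_, ?_, ?_⟩
    · simp [pvSpan, hs, hpos]
    · intro j
      have h1 : (-(PySem.Int.floordiv p s) ≤ j) ↔ ((-j) * s ≤ p) := by
        rw [show (-(PySem.Int.floordiv p s) ≤ j) ↔ (-j ≤ PySem.Int.floordiv p s) from by omega,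
          PySem.Int.le_floordiv_iff_mul_le hpos]
      have h2 : (j ≤ PySem.Int.floordiv (m - p) s) ↔ (j * s ≤ m - p) :=
        PySem.Int.le_floordiv_iff_mul_le hpos
      rw [h1, h2]
      constructor <;> intro h <;> constructor <;> nlinarith [h.1, h.2]
    · rintro ⟨hlo, hhi⟩
      set lo := -(PySem.Int.floordiv p s) with hlodef
      set hi := PySem.Int.floordiv (m - p) s with hhidef
      have hLO : (-lo) * s ≤ p := by
        rw [show ((-lo) * s ≤ p) ↔ (-lo ≤ PySem.Int.floordiv p s) from
          (PySem.Int.le_floordiv_iff_mul_le hpos).symm]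
        omega
      have hHI : hi * s ≤ m - p := by
        rw [show (hi * s ≤ m - p) ↔ (hi ≤ PySem.Int.floordiv (m - p) s) from
          (PySem.Int.le_floordiv_iff_mul_le hpos).symm]
      have hd : hi - lo ≤ m := by
        nlinarith [hLO, hHI, mul_nonneg (show (0:ℤ) ≤ hi - lo by omega) (show (0:ℤ) ≤ s - 1 by omega)]
      have hm : (0:ℤ) ≤ m := by omega
      rw [max_eq_left hm]
      omega

-- full characterization of pvCount under the non-degeneracy hypothesis
theorem pvCount_good (mx my px py sx sy : Int)
    (H : ¬ (sx = 0 ∧ sy = 0 ∧ 0 ≤ px ∧ px ≤ mx ∧ 0 ≤ py ∧ py ≤ my)) :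
    0 ≤ pvCount px py mx my sx sy ∧
    (∀ j : Int, 1 ≤ j → j ≤ pvCount px py mx my sx sy →
      0 ≤ px + j * sx ∧ px + j * sx ≤ mx ∧ 0 ≤ py + j * sy ∧ py + j * sy ≤ my) ∧
    ¬ (0 ≤ px + (pvCount px py mx my sx sy + 1) * sx ∧
       px + (pvCount px py mx my sx sy + 1) * sx ≤ mx ∧
       0 ≤ py + (pvCount px py mx my sx sy + 1) * sy ∧
       py + (pvCount px py mx my sx sy + 1) * sy ≤ my) ∧
    pvCount px py mx my sx sy < (mx.toNat : Int) + (my.toNat : Int) + 2 := by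
  by_cases hx : sx = 0
  · by_cases hy : sy = 0
    · -- both steps zero: H forces the start out of bounds, count = 0
      subst hx; subst hy
      have hout : ¬ (0 ≤ px ∧ px ≤ mx ∧ 0 ≤ py ∧ py ≤ my) := by tauto
      have : pvCount px py mx my 0 0 = 0 := by
        simp only [pvCount, pvSpan_zero]
        by_cases h1 : 0 ≤ px ∧ px ≤ mx <;> by_cases h2 : 0 ≤ py ∧ py ≤ my <;>
          simp [h1, h2]
      rw [this]
      refine ⟨le_refl 0, by omega, by simpa using hout, by positivity⟩
    · -- sx = 0, sy ≠ 0
      subst hx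
      obtain ⟨lo, hi, hsp, hchar, hbd⟩ := pvSpan_char py my sy hy
      by_cases hxin : 0 ≤ px ∧ px ≤ mx
      · by_cases hok : lo ≤ 1 ∧ 1 ≤ hi
        · have hK : pvCount px py mx my 0 sy = hi := by
            simp [pvCount, pvSpan_zero, hsp, hxin, hok]
          rw [hK]
          refine ⟨by omega, ?_, ?_, ?_⟩
          · intro j h1 h2
            have := (hchar j).mp ⟨by omega, h2⟩
            simp only [mul_zero, add_zero]
            exact ⟨hxin.1, hxin.2, this.1, this.2⟩
          · intro hcon
            have := (hchar (hi + 1)).mpr ⟨hcon.2.2.1, hcon.2.2.2⟩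
            omega
          · have := hbd hok
            have hmy : my ≤ (my.toNat : Int) := Int.self_le_toNat my
            have : hi ≤ max my 0 + 1 := this
            have h0 : (0:Int) ≤ (mx.toNat : Int) := by positivity
            omega
        · have hK : pvCount px py mx my 0 sy = 0 := by
            simp [pvCount, pvSpan_zero, hsp, hxin, hok]
          rw [hK]
          refine ⟨le_refl 0, by omega, ?_, by positivity⟩
          intro hcon
          exact hok ((hchar 1).mpr ⟨hcon.2.2.1, hcon.2.2.2⟩)
      · have hK : pvCount px py mx my 0 sy = 0 := by
          simp [pvCount, pvSpan_zero, hsp, hxin]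
        rw [hK]
        refine ⟨le_refl 0, by omega, ?_, by positivity⟩
        intro hcon
        exact hxin ⟨by simpa using hcon.1, by simpa using hcon.2.1⟩
  · by_cases hy : sy = 0
    · -- sx ≠ 0, sy = 0
      subst hy
      obtain ⟨lo, hi, hsp, hchar, hbd⟩ := pvSpan_char px mx sx hx
      by_cases hyin : 0 ≤ py ∧ py ≤ my
      · by_cases hok : lo ≤ 1 ∧ 1 ≤ hi
        · have hK : pvCount px py mx my sx 0 = hi := by
            simp [pvCount, pvSpan_zero, hsp, hyin, hok]
          rw [hK]
          refine ⟨by omega, ?_, ?_, ?_⟩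
          · intro j h1 h2
            have := (hchar j).mp ⟨by omega, h2⟩
            simp only [mul_zero, add_zero]
            exact ⟨this.1, this.2, hyin.1, hyin.2⟩
          · intro hcon
            have := (hchar (hi + 1)).mpr ⟨hcon.1, hcon.2.1⟩
            omega
          · have := hbd hok
            have hmx : mx ≤ (mx.toNat : Int) := Int.self_le_toNat mx
            have h0 : (0:Int) ≤ (my.toNat : Int) := by positivity
            omega
        · have hK : pvCount px py mx my sx 0 = 0 := by
            simp [pvCount, pvSpan_zero, hsp, hyin, hok]
          rw [hK]
          refine ⟨le_refl 0, by omega, ?_, by positivity⟩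
          intro hcon
          exact hok ((hchar 1).mpr ⟨hcon.1, hcon.2.1⟩)
      · have hK : pvCount px py mx my sx 0 = 0 := by
          simp [pvCount, pvSpan_zero, hsp, hyin]
        rw [hK]
        refine ⟨le_refl 0, by omega, ?_, by positivity⟩
        intro hcon
        exact hyin ⟨by simpa using hcon.2.2.1, by simpa using hcon.2.2.2⟩
    · -- both nonzero
      obtain ⟨lox, hix, hspx, hcharx, hbdx⟩ := pvSpan_char px mx sx hx
      obtain ⟨loy, hiy, hspy, hchary, hbdy⟩ := pvSpan_char py my sy hy
      by_cases hokx : lox ≤ 1 ∧ 1 ≤ hix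
      · by_cases hoky : loy ≤ 1 ∧ 1 ≤ hiy
        · have hK : pvCount px py mx my sx sy = min hix hiy := by
            simp [pvCount, hspx, hspy, hokx, hoky]
          rw [hK]
          refine ⟨by omega, ?_, ?_, ?_⟩
          · intro j h1 h2
            have hjx := (hcharx j).mp ⟨by omega, by omega⟩
            have hjy := (hchary j).mp ⟨by omega, by omega⟩
            exact ⟨hjx.1, hjx.2, hjy.1, hjy.2⟩
          · intro hcon
            have h1 := (hcharx (min hix hiy + 1)).mpr ⟨hcon.1, hcon.2.1⟩
            have h2 := (hchary (min hix hiy + 1)).mpr ⟨hcon.2.2.1, hcon.2.2.2⟩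
            omega
          · have hbx := hbdx hokx
            have hmx : mx ≤ (mx.toNat : Int) := Int.self_le_toNat mx
            have h0 : (0:Int) ≤ (my.toNat : Int) := by positivity
            omega
        · have hK : pvCount px py mx my sx sy = 0 := by
            simp [pvCount, hspx, hspy, hoky]
          rw [hK]
          refine ⟨le_refl 0, by omega, ?_, by positivity⟩
          intro hcon
          exact hoky ((hchary 1).mpr ⟨hcon.2.2.1, hcon.2.2.2⟩)
      · have hK : pvCount px py mx my sx sy = 0 := by
          simp [pvCount, hspx, hspy, hokx]
        rw [hK]
        refine ⟨le_refl 0, by omega, ?_, by positivity⟩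
        intro hcon
        exact hokx ((hcharx 1).mpr ⟨hcon.1, hcon.2.1⟩)

-- the fueled while loop produces exactly the K positions the closed form describes
theorem pvLoopA_eq (mx my sx sy : Int) :
    ∀ (fuel : Nat) (px py K : Int), 0 ≤ K → K < (fuel : Int) →
    (∀ j : Int, 1 ≤ j → j ≤ K →
      0 ≤ px + j * sx ∧ px + j * sx ≤ mx ∧ 0 ≤ py + j * sy ∧ py + j * sy ≤ my) →
    ¬ (0 ≤ px + (K + 1) * sx ∧ px + (K + 1) * sx ≤ mx ∧
       0 ≤ py + (K + 1) * sy ∧ py + (K + 1) * sy ≤ my) →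
    pvLoopA mx my sx sy px py fuel =
      (PySem.List.pyRange 1 (K + 1) 1).map (fun j => (px + j * sx, py + j * sy)) := by
  intro fuel
  induction fuel with
  | zero => intro px py K h0 hf _ _; exfalso; omega
  | succ n ih =>
    intro px py K h0 hf good bad
    by_cases hK : K = 0
    · subst hK
      have : px + sx < 0 ∨ px + sx > mx ∨ py + sy < 0 ∨ py + sy > my := by
        by_contra h
        push Not at h
        exact bad ⟨by linarith [h.1], by linarith [h.2.1], by linarith [h.2.2.1], by linarith [h.2.2.2]⟩
      simp only [pvLoopA]
      rw [if_pos (by tauto), PySem.List.pyRange_one_eq_nil (by omega), List.map_nil]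
    · -- K ≥ 1: first step succeeds
      have h1 := good 1 (by omega) (by omega)
      simp only [one_mul] at h1
      have hnot : ¬ (px + sx < 0 ∨ px + sx > mx ∨ py + sy < 0 ∨ py + sy > my) := by
        push Not; exact ⟨h1.1, h1.2.1, h1.2.2.1, h1.2.2.2⟩
      simp only [pvLoopA]
      rw [if_neg hnot]
      have hrec := ih (px + sx) (py + sy) (K - 1) (by omega) (by omega)
        (by
          intro j hj1 hj2
          have := good (j + 1) (by omega) (by omega)
          constructor; · nlinarith [this.1]
          constructor; · nlinarith [this.2.1]
          constructor; · nlinarith [this.2.2.1]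
          · nlinarith [this.2.2.2])
        (by
          intro hcon
          apply bad
          constructor; · nlinarith [hcon.1]
          constructor; · nlinarith [hcon.2.1]
          constructor; · nlinarith [hcon.2.2.1]
          · nlinarith [hcon.2.2.2])
      rw [hrec]
      rw [PySem.List.pyRange_one_cons (show (1:Int) < K + 1 by omega), List.map_cons]
      simp only [one_mul]
      congr 1
      rw [show K - 1 + 1 = K from by ring,
        PySem.List.pyRange_one (a := 1) (b := K),
        PySem.List.pyRange_one (a := 1 + 1) (b := K + 1)]
      rw [List.map_map, List.map_map,
        show ((K : Int) + 1 - (1 + 1)) = K - 1 from by ring]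
      apply List.map_congr_left
      intro k _
      simp only [Function.comp_apply, Prod.mk.injEq]
      constructor <;> ring

-- ===== VERDICT (by name: the statement is the Claim_ definition above) =====
theorem find_all_antinodes_spec : Claim_equal_find_all_antinodes := by
  intro mc c1 c2 _ hpre
  unfold Spec_find_all_antinodes find_all_antinodes find_all_antinodes_alt
  simp only []
  have hne : ¬ ((c2.1 - c1.1 = 0 ∧ c2.2 - c1.2 = 0) ∧ 0 ≤ c1.1 ∧ c1.1 ≤ mc.1 ∧ 0 ≤ c1.2 ∧ c1.2 ≤ mc.2) := by
    intro ⟨⟨e1, e2⟩, hin⟩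
    exact hpre ⟨Prod.ext (by omega) (by omega), hin⟩
  -- left direction: start c1, step (-(x2-x1), -(y2-y1))
  have HL : ¬ (-(c2.1 - c1.1) = 0 ∧ -(c2.2 - c1.2) = 0 ∧ 0 ≤ c1.1 ∧ c1.1 ≤ mc.1 ∧ 0 ≤ c1.2 ∧ c1.2 ≤ mc.2) := by
    intro ⟨e1, e2, hin⟩; exact hne ⟨⟨by omega, by omega⟩, hin⟩
  have HR : ¬ ((c2.1 - c1.1) = 0 ∧ (c2.2 - c1.2) = 0 ∧ 0 ≤ c2.1 ∧ c2.1 ≤ mc.1 ∧ 0 ≤ c2.2 ∧ c2.2 ≤ mc.2) := by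
    intro ⟨e1, e2, hin⟩
    exact hne ⟨⟨e1, e2⟩, by omega⟩
  obtain ⟨hL0, hLg, hLb, hLf⟩ := pvCount_good mc.1 mc.2 c1.1 c1.2 (-(c2.1 - c1.1)) (-(c2.2 - c1.2)) HL
  obtain ⟨hR0, hRg, hRb, hRf⟩ := pvCount_good mc.1 mc.2 c2.1 c2.2 (c2.1 - c1.1) (c2.2 - c1.2) HR
  have eL := pvLoopA_eq mc.1 mc.2 (-(c2.1 - c1.1)) (-(c2.2 - c1.2))
    (mc.1.toNat + mc.2.toNat + 2) c1.1 c1.2 _ hL0 (by push_cast; omega) hLg hLb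
  have eR := pvLoopA_eq mc.1 mc.2 (c2.1 - c1.1) (c2.2 - c1.2)
    (mc.1.toNat + mc.2.toNat + 2) c2.1 c2.2 _ hR0 (by push_cast; omega) hRg hRb
  rw [eL, eR]
  congr 1
  · apply List.map_congr_left
    intro j _
    simp only [Prod.mk.injEq]
    constructor <;> ring
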